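-- pv_equiv track=rewrite | github.com/wisdom-13/Algorithm | 백준/Bronze/31562. 전주 듣고 노래 맞히기/전주 듣고 노래 맞히기.py | search_song
-- ===== SOURCE A (Python) =====
-- def search_song(songs, search_pitch):
--     result = '!'
--     for title, pitch in songs.items():
--         if pitch[0:3] != search_pitch:
--             continue
--
--         if result != '!':
--             result = '?'
--             break
--
--         result = title
--
--     return result
-- ===== SOURCE B (Python) =====
-- def search_song(songs, search_pitch):
--     index = {}
--     for title, pitch in songs.items():
--         key = pitch[0:3]
--         index[key] = index.get(key, []) + [title]
--     hits = index.get(search_pitch, [])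
--     if not hits:
--         return '!'
--     if len(hits) == 1:
--         return hits[0]
--     return '?'
-- ===== Notes on version B (the rewrite author's own statement) =====
-- stated objective: alternative
-- what changed: A's single scan with a three-state sentinel accumulator and early break is replaced by building a grouping index (dict from 3-char pitch prefix to the list of titles) and answering by one dict lookup followed by a branch on the count.
-- intended difference: When a song literally titled '!' matches the search pitch and it absorbs all but at most one of the matches (>=2 matched titles, but after dropping leading '!' titles at most one remains and it is not '?'), A's sentinel '!' collides with the title so A returns that other title (e.g. 'X' for {'!':p,'X':p}) or '!' instead of the ambiguity marker '?', which B returns as intended. — e.g. on search_song([("!", "abc"), ("X", "abc")], "abc"): A returns "X", B returns "?"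
import Mathlib
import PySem

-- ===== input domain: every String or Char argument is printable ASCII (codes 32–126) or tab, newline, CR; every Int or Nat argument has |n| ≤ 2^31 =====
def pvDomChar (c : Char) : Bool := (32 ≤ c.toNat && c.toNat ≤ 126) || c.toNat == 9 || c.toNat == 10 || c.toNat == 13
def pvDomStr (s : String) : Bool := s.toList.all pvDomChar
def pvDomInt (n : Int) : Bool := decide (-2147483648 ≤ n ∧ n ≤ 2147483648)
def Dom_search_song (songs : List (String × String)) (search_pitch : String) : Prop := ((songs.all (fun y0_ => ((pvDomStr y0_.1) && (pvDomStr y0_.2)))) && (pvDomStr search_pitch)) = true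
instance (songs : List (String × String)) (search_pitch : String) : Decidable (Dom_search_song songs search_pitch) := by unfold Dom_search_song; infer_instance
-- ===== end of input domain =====

-- B replaces A's sentinel-driven three-state scan with early break by a grouping index
-- (dict: 3-char pitch prefix -> list of titles) built in one pass and answered by one lookup.


-- ===== PORT A =====
-- the for-loop over songs.items() with accumulator `result` ('!' sentinel, break on second match)
def searchLoopA (search_pitch : String) : List (String × String) → String → String
  | [], result => result
  | (title, pitch) :: rest, result =>
    if PySem.Str.slice pitch (some 0) (some 3) ≠ search_pitch then
      searchLoopA search_pitch rest result            -- continue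
    else if result ≠ "!" then "?"                     -- result = '?'; break; return result
    else searchLoopA search_pitch rest title          -- result = title

def search_song (songs : List (String × String)) (search_pitch : String) : String :=
  searchLoopA search_pitch songs "!"

-- ===== PORT B =====
-- build the grouping index { pitch[0:3] : [titles…] }, then one lookup and a branch on the count
def search_song_alt (songs : List (String × String)) (search_pitch : String) : String :=
  let index : PySem.Dict String (List String) :=
    songs.foldl
      (fun d tp =>
        let key := PySem.Str.slice tp.2 (some 0) (some 3)
        d.insert key (d.getD key [] ++ [tp.1]))
      PySem.Dict.empty
  let hits := index.getD search_pitch []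
  if hits.isEmpty then "!"
  else if hits.length == 1 then hits.headD "!"
  else "?"

-- ===== PRECONDITION & SPEC =====
-- the matched-title list, read directly off the input (used only by D_):
-- titles whose pitch starts with the searched 3-character prefix
def pvMatchedTitles (songs : List (String × String)) (search_pitch : String) : List String :=
  songs.foldr
    (fun tp acc => if tp.2.toList.take 3 = search_pitch.toList then tp.1 :: acc else acc) []

-- On inputs where a song literally titled '!' matches the search pitch and absorbs all but at most one
-- match (≥ 2 matched titles, but after dropping leading '!' titles at most one remains and it is not '?'),
-- A's sentinel '!' collides with the title, so A returns that remaining title (or '!') instead of the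
-- intended ambiguity marker '?', which B returns.
def D_search_song (songs : List (String × String)) (search_pitch : String) : Prop :=
  2 ≤ (pvMatchedTitles songs search_pitch).length ∧
  ((pvMatchedTitles songs search_pitch).dropWhile (· == "!")).length ≤ 1 ∧
  (pvMatchedTitles songs search_pitch).dropWhile (· == "!") ≠ ["?"]
instance (songs : List (String × String)) (search_pitch : String) : Decidable (D_search_song songs search_pitch) := by unfold D_search_song; infer_instance

def Spec_search_song (songs : List (String × String)) (search_pitch : String) (out : String) : Prop := ¬ D_search_song songs search_pitch → out = search_song_alt songs search_pitch
instance (songs : List (String × String)) (search_pitch : String) (out : String) : Decidable (Spec_search_song songs search_pitch out) := by unfold Spec_search_song; infer_instance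

def pvDiffWitness_search_song : (List (String × String)) × String := ([("!", "abc"), ("X", "abc")], "abc")
def pvDiffWitnessOut_search_song : String × String := ("X", "?")

-- ===== CLAIM (what is proved, stated in full; the proofs are below) =====
def Claim_unchanged_search_song : Prop := ∀ (songs : List (String × String)) (search_pitch : String), Dom_search_song songs search_pitch → Spec_search_song songs search_pitch (search_song songs search_pitch)
def Claim_changed_search_song : Prop := Dom_search_song (pvDiffWitness_search_song.1) (pvDiffWitness_search_song.2) ∧ D_search_song (pvDiffWitness_search_song.1) (pvDiffWitness_search_song.2) ∧ search_song (pvDiffWitness_search_song.1) (pvDiffWitness_search_song.2) = pvDiffWitnessOut_search_song.1 ∧ search_song_alt (pvDiffWitness_search_song.1) (pvDiffWitness_search_song.2) = pvDiffWitnessOut_search_song.2 ∧ pvDiffWitnessOut_search_song.1 ≠ pvDiffWitnessOut_search_song.2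
def Claim_exact_search_song : Prop := ∀ (songs : List (String × String)) (search_pitch : String), Dom_search_song songs search_pitch → D_search_song songs search_pitch → search_song songs search_pitch ≠ search_song_alt songs search_pitch

-- ===== LEMMAS AND PROOFS =====

-- the match condition of both ports, in pvMatchedTitles' terms
theorem slice3_eq_iff (p sp : String) :
    PySem.Str.slice p (some 0) (some 3) = sp ↔ p.toList.take 3 = sp.toList := by
  have hs : PySem.List.slice p.toList none (some 3) = p.toList.take 3 := by
    simpa using PySem.List.slice_to p.toList (by norm_num : (0:Int) ≤ 3)
  constructor
  · intro h
    rw [← h]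
    simp [PySem.Str.toList_slice, PySem.Chars.slice_eq_listSlice, hs]
  · intro h
    have : (PySem.Str.slice p (some 0) (some 3)).toList = sp.toList := by
      simp [PySem.Str.toList_slice, PySem.Chars.slice_eq_listSlice, hs, h]
    exact String.toList_inj.mp this

theorem matched_cons (t p : String) (rest : List (String × String)) (sp : String) :
    pvMatchedTitles ((t, p) :: rest) sp =
      if p.toList.take 3 = sp.toList then t :: pvMatchedTitles rest sp
      else pvMatchedTitles rest sp := rfl

-- A's loop, seen on the matched-title list only
def fAcc : List String → String → String
  | [], r => r
  | t :: ms, r => if r ≠ "!" then "?" else fAcc ms t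

theorem loopA_eq_fAcc (sp : String) (songs : List (String × String)) :
    ∀ r, searchLoopA sp songs r = fAcc (pvMatchedTitles songs sp) r := by
  induction songs with
  | nil => intro r; rfl
  | cons tp rest ih =>
    intro r
    obtain ⟨t, p⟩ := tp
    by_cases h : PySem.Str.slice p (some 0) (some 3) = sp
    · rw [matched_cons, if_pos ((slice3_eq_iff p sp).mp h)]
      by_cases hr : r = "!"
      · simp [searchLoopA, h, hr, fAcc, ih]
      · simp [searchLoopA, h, hr, fAcc]
    · rw [matched_cons, if_neg (fun hc => h ((slice3_eq_iff p sp).mpr hc))]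
      simp [searchLoopA, h, ih]

theorem fAcc_two (ms : List String) (h : 2 ≤ (ms.dropWhile (· == "!")).length) :
    fAcc ms "!" = "?" := by
  induction ms with
  | nil => simp [List.dropWhile] at h
  | cons t rest ih =>
    by_cases ht : t = "!"
    · subst ht
      rw [List.dropWhile_cons_of_pos (by simp)] at h
      simpa [fAcc] using ih h
    · rw [List.dropWhile_cons_of_neg (by simp [ht])] at h
      match rest, h with
      | u :: rest', _ => simp [fAcc, ht]

theorem fAcc_small (ms : List String) (h : (ms.dropWhile (· == "!")).length ≤ 1) :
    fAcc ms "!" = (ms.dropWhile (· == "!")).headD "!" := by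
  induction ms with
  | nil => rfl
  | cons t rest ih =>
    by_cases ht : t = "!"
    · subst ht
      rw [List.dropWhile_cons_of_pos (by simp)] at h ⊢
      simpa [fAcc] using ih h
    · rw [List.dropWhile_cons_of_neg (by simp [ht])] at h ⊢
      match rest, h with
      | [], _ => simp [fAcc]

-- the index B builds, looked up at the searched prefix, is exactly the matched-title list
theorem getD_index (sp : String) (songs : List (String × String)) :
    ∀ d : PySem.Dict String (List String),
      (songs.foldl
        (fun d tp =>
          let key := PySem.Str.slice tp.2 (some 0) (some 3)
          d.insert key (d.getD key [] ++ [tp.1])) d).getD sp []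
      = d.getD sp [] ++ pvMatchedTitles songs sp := by
  induction songs with
  | nil => intro d; simp [pvMatchedTitles]
  | cons tp rest ih =>
    intro d
    obtain ⟨t, p⟩ := tp
    rw [List.foldl_cons, ih, matched_cons]
    by_cases h : PySem.Str.slice p (some 0) (some 3) = sp
    · rw [if_pos ((slice3_eq_iff p sp).mp h)]
      rw [PySem.Dict.getD_insert, if_pos h.symm, h, List.append_assoc]; rfl
    · rw [if_neg (fun hc => h ((slice3_eq_iff p sp).mpr hc))]
      rw [PySem.Dict.getD_insert, if_neg (fun hc => h (Eq.symm hc))]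

theorem alt_eq (songs : List (String × String)) (sp : String) :
    search_song_alt songs sp =
      (if (pvMatchedTitles songs sp).isEmpty then "!"
       else if (pvMatchedTitles songs sp).length == 1 then (pvMatchedTitles songs sp).headD "!"
       else "?") := by
  unfold search_song_alt
  simp only [getD_index, PySem.Dict.getD_empty, List.nil_append]

-- ===== VERDICT (by name: the statement is the Claim_ definition above) =====
theorem search_song_spec : Claim_unchanged_search_song := by
  intro songs sp _ hD
  rw [show search_song songs sp = fAcc (pvMatchedTitles songs sp) "!" from
    loopA_eq_fAcc sp songs "!", alt_eq]
  unfold D_search_song at hD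
  generalize pvMatchedTitles songs sp = m at hD ⊢
  match m with
  | [] => rfl
  | [t] => simp [fAcc]
  | t :: u :: ms =>
    have h2 : 2 ≤ (t :: u :: ms).length := by simp
    rw [if_neg (by simp), if_neg (by simp)]
    rcases Nat.lt_or_ge 1 (((t :: u :: ms).dropWhile (· == "!")).length) with hs | hs
    · exact fAcc_two _ hs
    · have hq : ((t :: u :: ms).dropWhile (· == "!")) = ["?"] := by
        by_contra hq
        exact hD ⟨h2, hs, hq⟩
      rw [fAcc_small _ hs, hq]
      rfl

theorem search_song_changed : Claim_changed_search_song := by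
  unfold Claim_changed_search_song; decide

theorem search_song_tight : Claim_exact_search_song := by
  intro songs sp _ hD
  obtain ⟨h2, hs, hq⟩ := hD
  rw [show search_song songs sp = fAcc (pvMatchedTitles songs sp) "!" from
    loopA_eq_fAcc sp songs "!", alt_eq, fAcc_small _ hs]
  set m := pvMatchedTitles songs sp with hm
  have hne : ¬ (m.isEmpty = true) := by
    intro h
    rw [List.isEmpty_iff] at h
    rw [h] at h2
    simp at h2
  have hlen : ¬ ((m.length == 1) = true) := by
    simp only [beq_iff_eq]
    omega
  rw [if_neg hne, if_neg hlen]
  rcases hdw : m.dropWhile (· == "!") with _ | ⟨t, rest⟩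
  · decide
  · have hrest : rest = [] := by rw [hdw] at hs; simpa using hs
    subst hrest
    have ht : t ≠ "?" := fun h => hq (by rw [hdw, h])
    simpa using ht
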